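-- pv_equiv track=rewrite | github.com/HomoYouDidnt/kloros | src/cognition/meta_cognition/analyzers/semantic_analyzer.py | _detect_satisfaction_signals
-- ===== SOURCE A (Python) =====
-- from typing import Dict, Any, List, Optional
--
-- def _detect_satisfaction_signals(conversation: Dict[str, Any]) -> List[str]:
--     """Detect actual satisfaction signals from conversation."""
--     combined_text = conversation['combined_content'].lower()
--     signals = []
--
--     signal_markers = {
--         'thank you': 'gratitude_expressed',
--         'thanks': 'gratitude_expressed',
--         'good': 'positive_feedback',
--         'great': 'positive_feedback',
--         'perfect': 'positive_feedback',
--         'excellent': 'positive_feedback'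
--     }
--
--     for marker, signal in signal_markers.items():
--         if marker in combined_text and signal not in signals:
--             signals.append(signal)
--
--     return signals
-- ===== SOURCE B (Python) =====
-- def _detect_satisfaction_signals(conversation):
--     """Detect actual satisfaction signals from conversation."""
--     combined_text = conversation['combined_content'].lower()
--
--     grouped_markers = {
--         'gratitude_expressed': ['thank you', 'thanks'],
--         'positive_feedback': ['good', 'great', 'perfect', 'excellent'],
--     }
--
--     return [sig for sig, markers in grouped_markers.items()
--             if any(marker in combined_text for marker in markers)]
-- ===== Notes on version B (the rewrite author's own statement) =====
-- stated objective: simpler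
-- what changed: Inverts the marker->signal map into a signal->markers grouping traversed once with any(), which makes the 'signal not in signals' dedup guard and the appending loop disappear in favour of a single comprehension.
import Mathlib
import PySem

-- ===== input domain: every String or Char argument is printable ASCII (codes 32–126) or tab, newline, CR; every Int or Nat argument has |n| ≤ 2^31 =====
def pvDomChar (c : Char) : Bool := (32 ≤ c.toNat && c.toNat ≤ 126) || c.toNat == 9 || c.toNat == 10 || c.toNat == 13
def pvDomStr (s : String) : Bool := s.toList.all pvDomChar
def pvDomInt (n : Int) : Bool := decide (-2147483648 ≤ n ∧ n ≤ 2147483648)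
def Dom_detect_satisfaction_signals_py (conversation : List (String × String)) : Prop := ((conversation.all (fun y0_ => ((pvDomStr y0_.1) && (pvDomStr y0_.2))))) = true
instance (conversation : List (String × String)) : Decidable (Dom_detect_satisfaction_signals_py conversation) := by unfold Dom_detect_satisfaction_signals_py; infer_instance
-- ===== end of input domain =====

-- B inverts the marker→signal map into a signal→markers grouping traversed once with any(),
-- removing the 'signal not in signals' dedup guard (objective: simpler).


-- ===== PORT A =====
-- conversation['combined_content'] under Pre_ (key present); lower; scan the marker→signal
-- pairs in dict order, appending the signal if the marker occurs and it is not yet listed.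
def detect_satisfaction_signals_py (conversation : List (String × String)) : List String :=
  let combined_text := PySem.Str.lower (PySem.Dict.getD (PySem.Dict.mk conversation) "combined_content" "")
  let signal_markers : List (String × String) :=
    [("thank you", "gratitude_expressed"), ("thanks", "gratitude_expressed"),
     ("good", "positive_feedback"), ("great", "positive_feedback"),
     ("perfect", "positive_feedback"), ("excellent", "positive_feedback")]
  signal_markers.foldl
    (fun signals ms =>
      if PySem.Str.isIn ms.1 combined_text && !(signals.contains ms.2)
      then signals ++ [ms.2] else signals) []

-- ===== PORT B =====
-- grouped mapping signal → markers; keep the signal iff any of its markers occurs.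
def detect_satisfaction_signals_py_alt (conversation : List (String × String)) : List String :=
  let combined_text := PySem.Str.lower (PySem.Dict.getD (PySem.Dict.mk conversation) "combined_content" "")
  let grouped_markers : List (String × List String) :=
    [("gratitude_expressed", ["thank you", "thanks"]),
     ("positive_feedback", ["good", "great", "perfect", "excellent"])]
  (grouped_markers.filter
    (fun sm => sm.2.any (fun marker => PySem.Str.isIn marker combined_text))).map Prod.fst

-- ===== PRECONDITION & SPEC =====
-- Pre_ excludes inputs without a 'combined_content' key, on which A raises KeyError.
def Pre_detect_satisfaction_signals_py (conversation : List (String × String)) : Prop :=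
  (PySem.Dict.get? (PySem.Dict.mk conversation) "combined_content").isSome = true
instance (conversation : List (String × String)) : Decidable (Pre_detect_satisfaction_signals_py conversation) := by unfold Pre_detect_satisfaction_signals_py; infer_instance
def pvWitness_detect_satisfaction_signals_py : (List (String × String)) := [("combined_content", "thanks, that was Great!")]
def Spec_detect_satisfaction_signals_py (conversation : List (String × String)) (out : List String) : Prop := out = detect_satisfaction_signals_py_alt conversation
instance (conversation : List (String × String)) (out : List String) : Decidable (Spec_detect_satisfaction_signals_py conversation out) := by unfold Spec_detect_satisfaction_signals_py; infer_instance

-- ===== CLAIM (what is proved, stated in full; the proofs are below) =====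
def Claim_equal_detect_satisfaction_signals_py : Prop := ∀ (conversation : List (String × String)), Dom_detect_satisfaction_signals_py conversation → Pre_detect_satisfaction_signals_py conversation → Spec_detect_satisfaction_signals_py conversation (detect_satisfaction_signals_py conversation)

-- ===== LEMMAS AND PROOFS =====

-- both results, as a function of the lowered text alone
theorem detect_both_eq (t : String) :
    ([("thank you", "gratitude_expressed"), ("thanks", "gratitude_expressed"),
      ("good", "positive_feedback"), ("great", "positive_feedback"),
      ("perfect", "positive_feedback"), ("excellent", "positive_feedback")].foldl
      (fun (signals : List String) ms =>
        if PySem.Str.isIn ms.1 t && !(signals.contains ms.2)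
        then signals ++ [ms.2] else signals) [])
    = (([("gratitude_expressed", ["thank you", "thanks"]),
        ("positive_feedback", ["good", "great", "perfect", "excellent"])].filter
        (fun (sm : String × List String) =>
          sm.2.any (fun marker => PySem.Str.isIn marker t))).map Prod.fst) := by
  cases h1 : PySem.Chars.isIn ['t','h','a','n','k',' ','y','o','u'] t.toList <;>
  cases h2 : PySem.Chars.isIn ['t','h','a','n','k','s'] t.toList <;>
  cases h3 : PySem.Chars.isIn ['g','o','o','d'] t.toList <;>
  cases h4 : PySem.Chars.isIn ['g','r','e','a','t'] t.toList <;>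
  cases h5 : PySem.Chars.isIn ['p','e','r','f','e','c','t'] t.toList <;>
  cases h6 : PySem.Chars.isIn ['e','x','c','e','l','l','e','n','t'] t.toList <;>
  simp [List.foldl, List.filter, h1, h2, h3, h4, h5, h6]

-- ===== VERDICT (by name: the statement is the Claim_ definition above) =====
theorem detect_satisfaction_signals_py_spec : Claim_equal_detect_satisfaction_signals_py := by
  intro conversation _ _
  unfold Spec_detect_satisfaction_signals_py detect_satisfaction_signals_py detect_satisfaction_signals_py_alt
  exact detect_both_eq _
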